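-- pv_equiv track=rewrite | github.com/arturoornelasb/tibia-bonelord-469-cipher | scripts/experimental/transition_filter.py | find_splits
-- ===== SOURCE A (Python) =====
-- def find_splits(cipher, plain, pos_c=0, pos_p=0, current_mapping=None, current_split=None):
--     if current_mapping is None:
--         current_mapping = {}
--     if current_split is None:
--         current_split = []
--     if pos_p == len(plain):
--         if pos_c == len(cipher):
--             return [(dict(current_mapping), list(current_split))]
--         return []
--     if pos_c >= len(cipher):
--         return []
--     results = []
--     for width in [1, 2, 3]:
--         if pos_c + width > len(cipher):
--             continue
--         code = cipher[pos_c:pos_c + width]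
--         letter = plain[pos_p]
--         if code in current_mapping and current_mapping[code] != letter:
--             continue
--         new_mapping = dict(current_mapping)
--         new_mapping[code] = letter
--         new_split = current_split + [code]
--         results.extend(find_splits(cipher, plain, pos_c + width, pos_p + 1,
--                                    new_mapping, new_split))
--     return results
-- ===== SOURCE B (Python) =====
-- def find_splits(cipher, plain, pos_c=0, pos_p=0, current_mapping=None, current_split=None):
--     results = []
--     stack = [(pos_c, pos_p,
--               dict(current_mapping) if current_mapping else {},
--               list(current_split) if current_split else [])]
--     while stack:
--         c, p, mapping, split = stack.pop()
--         if p == len(plain):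
--             if c == len(cipher):
--                 results.append((mapping, split))
--             continue
--         if c >= len(cipher):
--             continue
--         letter = plain[p]
--         for width in (3, 2, 1):
--             if c + width > len(cipher):
--                 continue
--             code = cipher[c:c + width]
--             if code in mapping and mapping[code] != letter:
--                 continue
--             new_mapping = dict(mapping)
--             new_mapping[code] = letter
--             stack.append((c + width, p + 1, new_mapping, split + [code]))
--     return results
-- ===== Notes on version B (the rewrite author's own statement) =====
-- stated objective: alternative
-- what changed: A's recursive depth-first search is replaced by an iterative worklist loop over an explicit stack of (pos_c, pos_p, mapping, split) frames, pushing the width-3,2,1 children so that pop order reproduces A's width-1-first preorder.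
import Mathlib
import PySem

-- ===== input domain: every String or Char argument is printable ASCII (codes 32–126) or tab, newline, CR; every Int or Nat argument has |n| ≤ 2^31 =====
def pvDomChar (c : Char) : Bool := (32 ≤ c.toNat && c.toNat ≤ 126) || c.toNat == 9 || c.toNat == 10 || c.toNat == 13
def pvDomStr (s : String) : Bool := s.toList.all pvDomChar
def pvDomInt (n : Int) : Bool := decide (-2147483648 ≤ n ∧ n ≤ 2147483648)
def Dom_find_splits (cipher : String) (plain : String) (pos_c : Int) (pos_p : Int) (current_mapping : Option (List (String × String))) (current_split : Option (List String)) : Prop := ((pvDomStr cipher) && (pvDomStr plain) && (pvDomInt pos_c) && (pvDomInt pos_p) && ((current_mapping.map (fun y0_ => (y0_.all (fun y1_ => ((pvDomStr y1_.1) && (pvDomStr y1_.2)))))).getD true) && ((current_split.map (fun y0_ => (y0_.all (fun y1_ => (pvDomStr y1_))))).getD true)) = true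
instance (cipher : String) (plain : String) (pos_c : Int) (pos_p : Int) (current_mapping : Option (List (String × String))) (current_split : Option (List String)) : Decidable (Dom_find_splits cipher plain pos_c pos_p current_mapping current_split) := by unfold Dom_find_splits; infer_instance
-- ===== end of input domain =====

-- B replaces A's recursive DFS with an explicit-stack worklist loop (alternative decomposition, same cost).

-- shared one-liner: the Python test `code in mapping and mapping[code] != letter`, identical in A and B
def pvConflict (m : PySem.Dict String String) (code letter : String) : Bool :=
  match m.get? code with
  | some v => v != letter
  | none => false

-- ===== PORT A =====
-- A's recursive core; the `for width in [1, 2, 3]` loop over the literal list is unrolled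
-- into its three iterations in order (same state, same branch order).
def findSplitsGo (cipher plain : List Char) (pos_c pos_p : Int) (m : PySem.Dict String String) (sp : List String) : List ((List (String × String)) × List String) :=
  if pos_p = (plain.length : Int) then
    if pos_c = (cipher.length : Int) then [(m.items, sp)] else []
  else if pos_c ≥ (cipher.length : Int) then []
  else
    ((if pos_c + 1 > (cipher.length : Int) then []
      else
        let code := String.ofList (PySem.List.slice cipher (some pos_c) (some (pos_c + 1)))
        match PySem.List.pyGet? plain pos_p with
        | none => []   -- Python raises IndexError here (excluded by Pre_)
        | some lc =>
          let letter := String.ofList [lc]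
          if pvConflict m code letter then []
          else findSplitsGo cipher plain (pos_c + 1) (pos_p + 1) (m.insert code letter) (sp ++ [code])) ++
     (if pos_c + 2 > (cipher.length : Int) then []
      else
        let code := String.ofList (PySem.List.slice cipher (some pos_c) (some (pos_c + 2)))
        match PySem.List.pyGet? plain pos_p with
        | none => []
        | some lc =>
          let letter := String.ofList [lc]
          if pvConflict m code letter then []
          else findSplitsGo cipher plain (pos_c + 2) (pos_p + 1) (m.insert code letter) (sp ++ [code])) ++
     (if pos_c + 3 > (cipher.length : Int) then []
      else
        let code := String.ofList (PySem.List.slice cipher (some pos_c) (some (pos_c + 3)))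
        match PySem.List.pyGet? plain pos_p with
        | none => []
        | some lc =>
          let letter := String.ofList [lc]
          if pvConflict m code letter then []
          else findSplitsGo cipher plain (pos_c + 3) (pos_p + 1) (m.insert code letter) (sp ++ [code])))
termination_by ((cipher.length : Int) - pos_c).toNat
decreasing_by all_goals omega

def find_splits (cipher : String) (plain : String) (pos_c : Int) (pos_p : Int) (current_mapping : Option (List (String × String))) (current_split : Option (List String)) : List ((List (String × String)) × List String) :=
  findSplitsGo cipher.toList plain.toList pos_c pos_p
    (PySem.Dict.ofList (current_mapping.getD [])) (current_split.getD [])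

-- ===== PORT B =====
-- one iteration of B's `for width in (3, 2, 1)` push loop
def pushFrame (cipher : List Char) (c p : Int) (m : PySem.Dict String String) (sp : List String) (letter : String)
    (st : List (Int × Int × PySem.Dict String String × List String)) (width : Int) :
    List (Int × Int × PySem.Dict String String × List String) :=
  if c + width > (cipher.length : Int) then st
  else
    let code := String.ofList (PySem.List.slice cipher (some c) (some (c + width)))
    if pvConflict m code letter then st
    else (c + width, p + 1, m.insert code letter, sp ++ [code]) :: st

-- per-frame weight for the stack-loop termination measure
def frameW (clen : Nat) (f : Int × Int × PySem.Dict String String × List String) : Nat :=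
  4 ^ ((clen : Int) - f.1).toNat


-- termination helpers for the stack loop (cited by name in its decreasing_by)
theorem pv_pushW_le (cipher : List Char) (c p : Int) (m : PySem.Dict String String) (sp : List String)
    (letter : String) (st : List (Int × Int × PySem.Dict String String × List String)) (w : Int)
    (hw : 1 ≤ w) :
    ((pushFrame cipher c p m sp letter st w).map (frameW cipher.length)).sum ≤
      4 ^ ((((cipher.length : Int) - c).toNat) - 1) + (st.map (frameW cipher.length)).sum := by
  by_cases hg : c + w > (cipher.length : Int)
  · simp only [pushFrame, if_pos hg]
    exact Nat.le_add_left _ _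
  · by_cases hcf : pvConflict m (String.ofList (PySem.List.slice cipher (some c) (some (c + w)))) letter
    · simp only [pushFrame, if_neg hg, if_pos hcf]
      exact Nat.le_add_left _ _
    · simp only [pushFrame, if_neg hg, if_neg hcf, List.map_cons, List.sum_cons, frameW]
      have hexp : (((cipher.length : Int) - (c + w)).toNat) ≤ (((cipher.length : Int) - c).toNat) - 1 := by omega
      exact Nat.add_le_add_right (Nat.pow_le_pow_right (by norm_num) hexp) _ |>.trans (by omega)

theorem pv_push_measure_lt (cipher : List Char) (c p : Int) (m : PySem.Dict String String) (sp : List String)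
    (letter : String) (rest : List (Int × Int × PySem.Dict String String × List String))
    (hc : c < (cipher.length : Int)) :
    ((pushFrame cipher c p m sp letter
        (pushFrame cipher c p m sp letter (pushFrame cipher c p m sp letter rest 3) 2) 1).map
        (frameW cipher.length)).sum <
      frameW cipher.length (c, p, m, sp) + (rest.map (frameW cipher.length)).sum := by
  have h1 := pv_pushW_le cipher c p m sp letter
      (pushFrame cipher c p m sp letter (pushFrame cipher c p m sp letter rest 3) 2) 1 (by omega)
  have h2 := pv_pushW_le cipher c p m sp letter (pushFrame cipher c p m sp letter rest 3) 2 (by omega)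
  have h3 := pv_pushW_le cipher c p m sp letter rest 3 (by omega)
  have hr : 1 ≤ (((cipher.length : Int) - c).toNat) := by omega
  have hpow : frameW cipher.length (c, p, m, sp) = 4 ^ ((((cipher.length : Int) - c).toNat) - 1) * 4 := by
    simp only [frameW]
    rw [← pow_succ]
    congr 1
    omega
  have hx : (1:Nat) ≤ 4 ^ ((((cipher.length : Int) - c).toNat) - 1) := Nat.one_le_pow _ _ (by norm_num)
  omega

-- B's while-stack loop; head of the list is the top of the stack
def loopSplits (cipher plain : List Char) (stack : List (Int × Int × PySem.Dict String String × List String))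
    (results : List ((List (String × String)) × List String)) : List ((List (String × String)) × List String) :=
  match stack with
  | [] => results
  | (c, p, m, sp) :: rest =>
    if p = (plain.length : Int) then
      loopSplits cipher plain rest
        (if c = (cipher.length : Int) then results ++ [(m.items, sp)] else results)
    else if c ≥ (cipher.length : Int) then
      loopSplits cipher plain rest results
    else
      match PySem.List.pyGet? plain p with
      | none => loopSplits cipher plain rest results   -- Python raises IndexError here (excluded by Pre_)
      | some lc =>
        -- letter = plain[p]; passed to each push of the width loop
        loopSplits cipher plain
          (pushFrame cipher c p m sp (String.ofList [lc])
            (pushFrame cipher c p m sp (String.ofList [lc])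
              (pushFrame cipher c p m sp (String.ofList [lc]) rest 3) 2) 1)
          results
termination_by (stack.map (frameW cipher.length)).sum
decreasing_by
  all_goals simp only [List.map_cons, List.sum_cons]
  · have : (1:Nat) ≤ frameW cipher.length (c, p, m, sp) := Nat.one_le_pow _ _ (by norm_num)
    omega
  · have : (1:Nat) ≤ frameW cipher.length (c, p, m, sp) := Nat.one_le_pow _ _ (by norm_num)
    omega
  · have : (1:Nat) ≤ frameW cipher.length (c, p, m, sp) := Nat.one_le_pow _ _ (by norm_num)
    omega
  · exact pv_push_measure_lt cipher c p m sp _ rest (by omega)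

def find_splits_alt (cipher : String) (plain : String) (pos_c : Int) (pos_p : Int) (current_mapping : Option (List (String × String))) (current_split : Option (List String)) : List ((List (String × String)) × List String) :=
  loopSplits cipher.toList plain.toList
    [(pos_c, pos_p, PySem.Dict.ofList (current_mapping.getD []), current_split.getD [])] []

-- ===== PRECONDITION & SPEC =====
-- Pre_ excludes exactly the inputs on which Python A raises IndexError: pos_p different from
-- len(plain), pos_c still inside cipher, and pos_p not a valid (possibly negative) index of plain.
def Pre_find_splits (cipher : String) (plain : String) (pos_c : Int) (pos_p : Int) (current_mapping : Option (List (String × String))) (current_split : Option (List String)) : Prop :=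
  pos_p = (plain.toList.length : Int) ∨ (cipher.toList.length : Int) ≤ pos_c ∨
    (-(plain.toList.length : Int) ≤ pos_p ∧ pos_p < (plain.toList.length : Int))
instance (cipher : String) (plain : String) (pos_c : Int) (pos_p : Int) (current_mapping : Option (List (String × String))) (current_split : Option (List String)) : Decidable (Pre_find_splits cipher plain pos_c pos_p current_mapping current_split) := by unfold Pre_find_splits; infer_instance

def pvWitness_find_splits : String × String × Int × Int × (Option (List (String × String))) × Option (List String) :=
  ("abab", "xy", 0, 0, none, none)

def Spec_find_splits (cipher : String) (plain : String) (pos_c : Int) (pos_p : Int) (current_mapping : Option (List (String × String))) (current_split : Option (List String)) (out : List ((List (String × String)) × List String)) : Prop := out = find_splits_alt cipher plain pos_c pos_p current_mapping current_split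
instance (cipher : String) (plain : String) (pos_c : Int) (pos_p : Int) (current_mapping : Option (List (String × String))) (current_split : Option (List String)) (out : List ((List (String × String)) × List String)) : Decidable (Spec_find_splits cipher plain pos_c pos_p current_mapping current_split out) := by unfold Spec_find_splits; infer_instance

-- ===== CLAIM (what is proved, stated in full; the proofs are below) =====
def Claim_equal_find_splits : Prop := ∀ (cipher : String) (plain : String) (pos_c : Int) (pos_p : Int) (current_mapping : Option (List (String × String))) (current_split : Option (List String)), Dom_find_splits cipher plain pos_c pos_p current_mapping current_split → Pre_find_splits cipher plain pos_c pos_p current_mapping current_split → Spec_find_splits cipher plain pos_c pos_p current_mapping current_split (find_splits cipher plain pos_c pos_p current_mapping current_split)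

-- ===== LEMMAS AND PROOFS =====

theorem flatMap_pushFrame (cipher plain : List Char) (c p : Int) (m : PySem.Dict String String)
    (sp : List String) (letter : String)
    (st : List (Int × Int × PySem.Dict String String × List String)) (w : Int) :
    ((pushFrame cipher c p m sp letter st w).flatMap
        (fun f => findSplitsGo cipher plain f.1 f.2.1 f.2.2.1 f.2.2.2)) =
      (if c + w > (cipher.length : Int) then []
       else if pvConflict m (String.ofList (PySem.List.slice cipher (some c) (some (c + w)))) letter then []
       else findSplitsGo cipher plain (c + w) (p + 1)
         (m.insert (String.ofList (PySem.List.slice cipher (some c) (some (c + w)))) letter)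
         (sp ++ [String.ofList (PySem.List.slice cipher (some c) (some (c + w)))])) ++
      st.flatMap (fun f => findSplitsGo cipher plain f.1 f.2.1 f.2.2.1 f.2.2.2) := by
  by_cases hg : c + w > (cipher.length : Int)
  · simp [pushFrame, hg]
  · by_cases hcf : pvConflict m (String.ofList (PySem.List.slice cipher (some c) (some (c + w)))) letter
    · simp [pushFrame, hg, hcf]
    · simp [pushFrame, hg, hcf]

theorem loop_eq_flatMap (cipher plain : List Char)
    (stack : List (Int × Int × PySem.Dict String String × List String))
    (results : List ((List (String × String)) × List String)) :
    loopSplits cipher plain stack results =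
      results ++ stack.flatMap (fun f => findSplitsGo cipher plain f.1 f.2.1 f.2.2.1 f.2.2.2) := by
  fun_induction loopSplits cipher plain stack results
  · simp
  · rename_i ih
    simp only [dite_eq_ite] at ih
    rw [ih, List.flatMap_cons, findSplitsGo]
    simp_all
    split_ifs <;> simp
  · rename_i ih
    rw [ih, List.flatMap_cons, findSplitsGo]
    simp_all
  · rename_i ih
    rw [ih, List.flatMap_cons, findSplitsGo]
    simp_all
  · rename_i hnp hcge lc hget ih
    rw [ih]; clear ih
    rw [flatMap_pushFrame, flatMap_pushFrame, flatMap_pushFrame, List.flatMap_cons]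
    conv_rhs => rw [findSplitsGo]
    simp [hnp, hget, hcge, List.append_assoc]

-- ===== VERDICT (by name: the statement is the Claim_ definition above) =====
theorem find_splits_spec : Claim_equal_find_splits := by
  intro cipher plain pos_c pos_p cm cs _ _
  unfold Spec_find_splits find_splits find_splits_alt
  rw [loop_eq_flatMap]
  simp
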